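-- pv_equiv track=rewrite | github.com/EduardaAAmaral/Gerenciamento_de_Pagina | gerenciador_memoria_tamanhos.py | faltas_pagina_lru
-- ===== SOURCE A (Python) =====
-- from collections import OrderedDict, deque
--
-- def faltas_pagina_lru(acessos, num_frames):
--     memoria = OrderedDict()
--     faltas = 0
--     carregamentos = 0
--
--     for pagina in acessos:
--         if pagina not in memoria:
--             faltas += 1
--             carregamentos += 1
--             if len(memoria) >= num_frames:
--                 memoria.popitem(last=False)
--             memoria[pagina] = None
--         else:
--             memoria.move_to_end(pagina)
--
--     return faltas, carregamentos
-- ===== SOURCE B (Python) =====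
-- def faltas_pagina_lru(acessos, num_frames):
--     memoria = {}  # page -> last-use timestamp
--     clock = 0
--     faltas = 0
--     carregamentos = 0
--     for pagina in acessos:
--         clock += 1
--         if pagina in memoria:
--             memoria[pagina] = clock
--         else:
--             faltas += 1
--             carregamentos += 1
--             if len(memoria) >= num_frames:
--                 del memoria[min(memoria, key=memoria.get)]
--             memoria[pagina] = clock
--     return faltas, carregamentos
-- ===== Notes on version B (the rewrite author's own statement) =====
-- stated objective: alternative
-- what changed: Replaces the OrderedDict recency queue (move_to_end/popitem) with a plain dict of last-use timestamps plus a monotonic clock, evicting the key with the minimal timestamp.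
import Mathlib
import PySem

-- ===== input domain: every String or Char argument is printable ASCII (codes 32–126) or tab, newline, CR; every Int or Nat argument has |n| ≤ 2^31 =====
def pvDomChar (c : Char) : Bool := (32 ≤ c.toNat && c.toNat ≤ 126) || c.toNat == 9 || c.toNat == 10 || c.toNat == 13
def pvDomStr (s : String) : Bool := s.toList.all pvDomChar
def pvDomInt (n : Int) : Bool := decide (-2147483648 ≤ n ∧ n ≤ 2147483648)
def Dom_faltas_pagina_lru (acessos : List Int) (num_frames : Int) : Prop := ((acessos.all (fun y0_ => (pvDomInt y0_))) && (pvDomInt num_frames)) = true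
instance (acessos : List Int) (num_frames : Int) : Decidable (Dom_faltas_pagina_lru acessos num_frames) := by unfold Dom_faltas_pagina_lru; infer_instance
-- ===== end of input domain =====

-- B replaces A's OrderedDict recency queue with a timestamp dict + clock; same LRU fault counts, proved equal.

-- ===== PORT A =====
-- OrderedDict with None values modelled as its key list (oldest first); move_to_end = erase + append,
-- popitem(last=False) = drop head (under Pre_ the dict is nonempty there).
def stepA (num_frames : Int) (st : List Int × Int × Int) (pagina : Int) : List Int × Int × Int :=
  if pagina ∉ st.1 then
    ((if (st.1.length : Int) ≥ num_frames then st.1.tail else st.1) ++ [pagina],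
      st.2.1 + 1, st.2.2 + 1)
  else
    (st.1.erase pagina ++ [pagina], st.2.1, st.2.2)

def faltas_pagina_lru (acessos : List Int) (num_frames : Int) : Int × Int :=
  (acessos.foldl (stepA num_frames) ([], 0, 0)).2

-- ===== PORT B =====
-- state: ((memoria : page -> last-use timestamp, clock), faltas, carregamentos); the `none` arm of the
-- min? match is unreachable under Pre_ (Python raises ValueError there) and only keeps the port total.
def stepB (num_frames : Int) (st : (PySem.Dict Int Int × Int) × Int × Int) (pagina : Int) :
    (PySem.Dict Int Int × Int) × Int × Int :=
  if st.1.1.contains pagina then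
    ((st.1.1.insert pagina (st.1.2 + 1), st.1.2 + 1), st.2)
  else
    (((if (st.1.1.size : Int) ≥ num_frames then
          match PySem.List.min? st.1.1.keys (fun k => st.1.1.getD k 0) with
          | some v => st.1.1.erase v
          | none => st.1.1
        else st.1.1).insert pagina (st.1.2 + 1), st.1.2 + 1),
      st.2.1 + 1, st.2.2 + 1)

def faltas_pagina_lru_alt (acessos : List Int) (num_frames : Int) : Int × Int :=
  (acessos.foldl (stepB num_frames) ((PySem.Dict.empty, 0), 0, 0)).2

-- ===== PRECONDITION & SPEC =====
-- Pre_ excludes num_frames ≤ 0 with a nonempty access list: there A raises KeyError (popitem on an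
-- empty OrderedDict) and B raises ValueError (min of an empty dict); neither returns a value.
def Pre_faltas_pagina_lru (acessos : List Int) (num_frames : Int) : Prop :=
  acessos = [] ∨ 1 ≤ num_frames
instance (acessos : List Int) (num_frames : Int) : Decidable (Pre_faltas_pagina_lru acessos num_frames) := by unfold Pre_faltas_pagina_lru; infer_instance

def pvWitness_faltas_pagina_lru : List Int × Int := ([1, 2, 3, 1, 2, 4, 1], 2)

def Spec_faltas_pagina_lru (acessos : List Int) (num_frames : Int) (out : Int × Int) : Prop := out = faltas_pagina_lru_alt acessos num_frames
instance (acessos : List Int) (num_frames : Int) (out : Int × Int) : Decidable (Spec_faltas_pagina_lru acessos num_frames out) := by unfold Spec_faltas_pagina_lru; infer_instance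

-- ===== CLAIM (what is proved, stated in full; the proofs are below) =====
def Claim_equal_faltas_pagina_lru : Prop := ∀ (acessos : List Int) (num_frames : Int), Dom_faltas_pagina_lru acessos num_frames → Pre_faltas_pagina_lru acessos num_frames → Spec_faltas_pagina_lru acessos num_frames (faltas_pagina_lru acessos num_frames)

-- ===== LEMMAS AND PROOFS =====

-- Coupling invariant: A's key list L (oldest first) and B's (dict, clock) describe the same memory:
-- same keys, timestamps strictly increase along L, and all timestamps are at most the clock.
def LruInv (L : List Int) (d : PySem.Dict Int Int) (c : Int) : Prop :=
  (∀ k, k ∈ L ↔ d.contains k = true) ∧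
  d.keys.Nodup ∧
  L.Pairwise (fun a b => d.getD a 0 < d.getD b 0) ∧
  (∀ k ∈ L, d.getD k 0 ≤ c) ∧
  (L.length : Int) = (d.size : Int)

-- items-level facts about Dict.erase (not in the PySem lemma book)
theorem find?_filter_ne {k k' : Int} (h : k' ≠ k) (l : List (Int × Int)) :
    (l.filter (fun p => !p.1 == k)).find? (fun p => p.1 == k') = l.find? (fun p => p.1 == k') := by
  induction l with
  | nil => rfl
  | cons q t ih =>
    by_cases hq : q.1 = k
    · rw [List.filter_cons_of_neg (by simp [hq]), ih,
        List.find?_cons_of_neg (by simp [hq, Ne.symm h])]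
    · rw [List.filter_cons_of_pos (by simp [hq])]
      by_cases hq' : q.1 = k'
      · rw [List.find?_cons_of_pos (by simp [hq']), List.find?_cons_of_pos (by simp [hq'])]
      · rw [List.find?_cons_of_neg (by simp [hq']), List.find?_cons_of_neg (by simp [hq']), ih]

theorem get?_erase_of_ne (d : PySem.Dict Int Int) {k k' : Int} (h : k' ≠ k) :
    (d.erase k).get? k' = d.get? k' := by
  simp [PySem.Dict.erase, PySem.Dict.get?, find?_filter_ne h]

theorem getD_erase_of_ne (d : PySem.Dict Int Int) {k k' : Int} (h : k' ≠ k) (d0 : Int) :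
    (d.erase k).getD k' d0 = d.getD k' d0 := by
  simp [PySem.Dict.getD, get?_erase_of_ne d h]

theorem contains_erase (d : PySem.Dict Int Int) (k k' : Int) :
    (d.erase k).contains k' = (k' != k && d.contains k') := by
  by_cases h : k' = k
  · simp [PySem.Dict.erase, PySem.Dict.contains, List.any_filter, h]
  · simp only [PySem.Dict.erase, PySem.Dict.contains, List.any_filter]
    have he : (fun p : Int × Int => !p.1 == k && p.1 == k') = fun p => p.1 == k' := by
      funext p
      by_cases hp : p.1 = k <;> simp [hp, Ne.symm h]
    simp [he, bne, beq_iff_eq, h]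

theorem keys_erase_sublist (d : PySem.Dict Int Int) (k : Int) :
    (d.erase k).keys.Sublist d.keys := by
  simp only [PySem.Dict.keys, PySem.Dict.erase]
  exact List.Sublist.map _ List.filter_sublist

theorem length_filter_ne_of_mem {l : List (Int × Int)} {k : Int}
    (hnd : (l.map Prod.fst).Nodup) (hk : k ∈ l.map Prod.fst) :
    (l.filter (fun p => !p.1 == k)).length = l.length - 1 := by
  induction l with
  | nil => simp at hk
  | cons q t ih =>
    simp only [List.map_cons, List.nodup_cons] at hnd
    rcases List.mem_cons.1 hk with h | h
    · rw [List.filter_cons_of_neg (by simp [h])]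
      rw [List.filter_eq_self.2 ?_]
      · simp
      · intro q' hq'
        have hm : q'.1 ∈ List.map Prod.fst t := List.mem_map_of_mem hq'
        have : q'.1 ≠ k := by
          intro e; rw [e, h] at hm; exact hnd.1 hm
        simp [this]
    · have hne : q.1 ≠ k := by intro e; rw [← e] at h; exact hnd.1 h
      rw [List.filter_cons_of_pos (by simp [hne]), List.length_cons, ih hnd.2 h]
      have ht : t ≠ [] := by rintro rfl; simp at h
      have := List.length_pos_iff.2 ht
      simp only [List.length_cons]
      omega

theorem size_erase_of_contains (d : PySem.Dict Int Int) {k : Int}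
    (hnd : d.keys.Nodup) (h : d.contains k = true) :
    (d.erase k).size = d.size - 1 := by
  have hk : k ∈ d.keys := (PySem.Dict.contains_iff_mem_keys d k).1 h
  simpa [PySem.Dict.erase, PySem.Dict.size, PySem.Dict.keys] using
    length_filter_ne_of_mem (l := d.items) (k := k) hnd hk

-- the min-timestamp key is A's head (the LRU victim)
theorem min_eq_head {L' : List Int} {v : Int} {d : PySem.Dict Int Int} {c : Int}
    (hinv : LruInv (v :: L') d c) :
    PySem.List.min? d.keys (fun k => d.getD k 0) = some v := by
  obtain ⟨hmem, hnd, hpw, hle, hlen⟩ := hinv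
  cases h : PySem.List.min? d.keys (fun k => d.getD k 0) with
  | none =>
    have : d.keys = [] := (PySem.List.min?_eq_none_iff _ _).1 h
    have hv : d.contains v = true := (hmem v).1 (by simp)
    rw [PySem.Dict.contains_iff_mem_keys, this] at hv
    simp at hv
  | some m =>
    have hmk : m ∈ d.keys := PySem.List.min?_mem h
    have hmL : m ∈ v :: L' := (hmem m).2 ((PySem.Dict.contains_iff_mem_keys d m).2 hmk)
    have hvk : v ∈ d.keys := (PySem.Dict.contains_iff_mem_keys d v).1 ((hmem v).1 (by simp))
    have hmin := PySem.List.min?_isMin h v hvk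
    rcases List.mem_cons.1 hmL with rfl | hm
    · rfl
    · have : d.getD v 0 < d.getD m 0 := (List.pairwise_cons.1 hpw).1 m hm
      omega

-- one step of the loops preserves the coupling and the counters
theorem step_sim {num_frames : Int} (hnf : 1 ≤ num_frames)
    {L : List Int} {d : PySem.Dict Int Int} {c f g : Int} (hinv : LruInv L d c) (p : Int) :
    (stepA num_frames (L, f, g) p).2 = (stepB num_frames ((d, c), f, g) p).2 ∧
    LruInv (stepA num_frames (L, f, g) p).1 (stepB num_frames ((d, c), f, g) p).1.1
        (stepB num_frames ((d, c), f, g) p).1.2 := by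
  obtain ⟨hmem, hnd, hpw, hle, hlen⟩ := hinv
  have hLnd : L.Nodup := hpw.imp (fun hlt => by rintro rfl; exact lt_irrefl _ hlt)
  by_cases hp : p ∈ L
  · -- hit
    have hc : d.contains p = true := (hmem p).1 hp
    have hA : stepA num_frames (L, f, g) p = (L.erase p ++ [p], f, g) := by
      simp only [stepA]; rw [if_neg (not_not_intro hp)]
    have hB : stepB num_frames ((d, c), f, g) p = ((d.insert p (c + 1), c + 1), f, g) := by
      simp only [stepB]; rw [if_pos hc]
    rw [hA, hB]
    refine ⟨rfl, show LruInv (L.erase p ++ [p]) (d.insert p (c + 1)) (c + 1) from ?_⟩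
    refine ⟨?_, PySem.Dict.nodup_keys_insert _ _ _ hnd, ?_, ?_, ?_⟩
    · intro k
      rw [PySem.Dict.contains_insert]
      constructor
      · intro hk
        rcases List.mem_append.1 hk with hk | hk
        · have := hLnd.mem_erase_iff.1 hk
          simp [(hmem k).1 this.2]
        · simp [List.mem_singleton.1 hk]
      · intro hk
        by_cases hkp : k = p
        · simp [hkp]
        · simp only [Bool.or_eq_true, beq_iff_eq, hkp, false_or] at hk
          exact List.mem_append.2 (Or.inl (hLnd.mem_erase_iff.2 ⟨hkp, (hmem k).2 hk⟩))
    · apply List.pairwise_append.2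
      refine ⟨?_, List.pairwise_singleton _ _, ?_⟩
      · apply List.Pairwise.imp_of_mem ?_ (hpw.sublist (List.erase_sublist ..))
        intro a b ha hb hab
        have hap : a ≠ p := (hLnd.mem_erase_iff.1 ha).1
        have hbp : b ≠ p := (hLnd.mem_erase_iff.1 hb).1
        rwa [PySem.Dict.getD_insert_of_ne _ _ _ hap, PySem.Dict.getD_insert_of_ne _ _ _ hbp]
      · intro a ha b hb
        rw [List.mem_singleton] at hb; rw [hb]
        have hap : a ≠ p := (hLnd.mem_erase_iff.1 ha).1
        have haL : a ∈ L := (hLnd.mem_erase_iff.1 ha).2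
        rw [PySem.Dict.getD_insert_of_ne _ _ _ hap, PySem.Dict.getD_insert_self]
        have := hle a haL; omega
    · intro k hk
      rcases List.mem_append.1 hk with hk | hk
      · have hap : k ≠ p := (hLnd.mem_erase_iff.1 hk).1
        rw [PySem.Dict.getD_insert_of_ne _ _ _ hap]
        have := hle k (hLnd.mem_erase_iff.1 hk).2; omega
      · rw [List.mem_singleton.1 hk, PySem.Dict.getD_insert_self]
    · rw [PySem.Dict.size_insert, if_pos hc, List.length_append, List.length_erase_of_mem hp]
      have h1 : 1 ≤ L.length := List.length_pos_iff.2 (by rintro rfl; simp at hp)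
      simp only [List.length_cons, List.length_nil]
      omega
  · -- miss
    have hc : d.contains p = false := by
      cases h : d.contains p
      · rfl
      · exact absurd ((hmem p).2 h) hp
    have hcP : ¬ (d.contains p = true) := by simp [hc]
    by_cases hev : (L.length : Int) ≥ num_frames
    · -- eviction
      have hL1 : 1 ≤ L.length := by
        have : (1 : Int) ≤ (L.length : Int) := le_trans hnf hev
        exact_mod_cast this
      obtain ⟨v, L', rfl⟩ : ∃ v L', L = v :: L' := by
        cases L with
        | nil => simp at hL1
        | cons v L' => exact ⟨v, L', rfl⟩
      have hmin := min_eq_head ⟨hmem, hnd, hpw, hle, hlen⟩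
      have hdev : ((d.size : Int) ≥ num_frames) := by rw [← hlen]; exact hev
      have hvL' : v ∉ L' := (List.nodup_cons.1 hLnd).1
      have hpv : p ≠ v := by intro e; exact hp (e ▸ List.mem_cons_self ..)
      have hcv : d.contains v = true := (hmem v).1 (by simp)
      have hce : (d.erase v).contains p = false := by
        rw [contains_erase, hc, Bool.and_false]
      have hA : stepA num_frames (v :: L', f, g) p = (L' ++ [p], f + 1, g + 1) := by
        simp only [stepA]; rw [if_pos hp, if_pos hev]; rfl
      have hB : stepB num_frames ((d, c), f, g) p =
          (((d.erase v).insert p (c + 1), c + 1), f + 1, g + 1) := by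
        simp only [stepB]; rw [if_neg hcP, if_pos hdev, hmin]
      rw [hA, hB]
      refine ⟨rfl, show LruInv (L' ++ [p]) ((d.erase v).insert p (c + 1)) (c + 1) from ?_⟩
      refine ⟨?_, PySem.Dict.nodup_keys_insert _ _ _ ((keys_erase_sublist d v).nodup hnd),
        ?_, ?_, ?_⟩
      · intro k
        rw [PySem.Dict.contains_insert, contains_erase]
        constructor
        · intro hk
          rcases List.mem_append.1 hk with hk | hk
          · have hkv : k ≠ v := by intro e; exact hvL' (e ▸ hk)
            simp [bne, hkv, (hmem k).1 (List.mem_cons_of_mem _ hk)]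
          · simp [List.mem_singleton.1 hk]
        · intro hk
          by_cases hkp : k = p
          · simp [hkp]
          · simp only [Bool.or_eq_true, beq_iff_eq, hkp, false_or, Bool.and_eq_true, bne_iff_ne, ne_eq] at hk
            have hkL : k ∈ v :: L' := (hmem k).2 hk.2
            rcases List.mem_cons.1 hkL with rfl | h
            · exact absurd rfl hk.1
            · exact List.mem_append.2 (Or.inl h)
      · apply List.pairwise_append.2
        refine ⟨?_, List.pairwise_singleton _ _, ?_⟩
        · apply List.Pairwise.imp_of_mem (l := L') ?_ (List.pairwise_cons.1 hpw).2
          intro a b ha hb hab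
          have hav : a ≠ v := fun e => hvL' (e ▸ ha)
          have hbv : b ≠ v := fun e => hvL' (e ▸ hb)
          have hap : a ≠ p := fun e => hp (e ▸ List.mem_cons_of_mem _ ha)
          have hbp : b ≠ p := fun e => hp (e ▸ List.mem_cons_of_mem _ hb)
          rwa [PySem.Dict.getD_insert_of_ne _ _ _ hap, PySem.Dict.getD_insert_of_ne _ _ _ hbp,
            getD_erase_of_ne d hav, getD_erase_of_ne d hbv]
        · intro a ha b hb
          rw [List.mem_singleton] at hb; rw [hb]
          have hav : a ≠ v := fun e => hvL' (e ▸ ha)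
          have hap : a ≠ p := fun e => hp (e ▸ List.mem_cons_of_mem _ ha)
          rw [PySem.Dict.getD_insert_of_ne _ _ _ hap, PySem.Dict.getD_insert_self,
            getD_erase_of_ne d hav]
          have := hle a (List.mem_cons_of_mem _ ha); omega
      · intro k hk
        rcases List.mem_append.1 hk with hk | hk
        · have hkv : k ≠ v := fun e => hvL' (e ▸ hk)
          have hkp : k ≠ p := fun e => hp (e ▸ List.mem_cons_of_mem _ hk)
          rw [PySem.Dict.getD_insert_of_ne _ _ _ hkp, getD_erase_of_ne d hkv]
          have := hle k (List.mem_cons_of_mem _ hk); omega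
        · rw [List.mem_singleton.1 hk, PySem.Dict.getD_insert_self]
      · rw [PySem.Dict.size_insert, if_neg (by simp [hce]), size_erase_of_contains d hnd hcv]
        have hlen' : (L'.length : Int) + 1 = (d.size : Int) := by simpa using hlen
        have hs1 : 1 ≤ d.size := by
          have h1 : (1 : Int) ≤ (d.size : Int) := by omega
          exact_mod_cast h1
        simp only [List.length_append, List.length_cons, List.length_nil]
        omega
    · -- no eviction
      have hdev : ¬ ((d.size : Int) ≥ num_frames) := by rw [← hlen]; exact hev
      have hA : stepA num_frames (L, f, g) p = (L ++ [p], f + 1, g + 1) := by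
        simp only [stepA]; rw [if_pos hp, if_neg hev]
      have hB : stepB num_frames ((d, c), f, g) p =
          ((d.insert p (c + 1), c + 1), f + 1, g + 1) := by
        simp only [stepB]; rw [if_neg hcP, if_neg hdev]
      rw [hA, hB]
      refine ⟨rfl, show LruInv (L ++ [p]) (d.insert p (c + 1)) (c + 1) from ?_⟩
      refine ⟨?_, PySem.Dict.nodup_keys_insert _ _ _ hnd, ?_, ?_, ?_⟩
      · intro k
        rw [PySem.Dict.contains_insert]
        constructor
        · intro hk
          rcases List.mem_append.1 hk with hk | hk
          · simp [(hmem k).1 hk]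
          · simp [List.mem_singleton.1 hk]
        · intro hk
          by_cases hkp : k = p
          · simp [hkp]
          · simp only [Bool.or_eq_true, beq_iff_eq, hkp, false_or] at hk
            exact List.mem_append.2 (Or.inl ((hmem k).2 hk))
      · apply List.pairwise_append.2
        refine ⟨?_, List.pairwise_singleton _ _, ?_⟩
        · apply List.Pairwise.imp_of_mem (l := L) ?_ hpw
          intro a b ha hb hab
          have hap : a ≠ p := fun e => hp (e ▸ ha)
          have hbp : b ≠ p := fun e => hp (e ▸ hb)
          rwa [PySem.Dict.getD_insert_of_ne _ _ _ hap, PySem.Dict.getD_insert_of_ne _ _ _ hbp]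
        · intro a ha b hb
          rw [List.mem_singleton] at hb; rw [hb]
          have hap : a ≠ p := fun e => hp (e ▸ ha)
          rw [PySem.Dict.getD_insert_of_ne _ _ _ hap, PySem.Dict.getD_insert_self]
          have := hle a ha; omega
      · intro k hk
        rcases List.mem_append.1 hk with hk | hk
        · have hkp : k ≠ p := fun e => hp (e ▸ hk)
          rw [PySem.Dict.getD_insert_of_ne _ _ _ hkp]
          have := hle k hk; omega
        · rw [List.mem_singleton.1 hk, PySem.Dict.getD_insert_self]
      · rw [PySem.Dict.size_insert, if_neg (by simp [hc]), List.length_append]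
        simp only [List.length_cons, List.length_nil]
        omega

theorem loop_sim {num_frames : Int} (hnf : 1 ≤ num_frames) :
    ∀ (acessos : List Int) (L : List Int) (d : PySem.Dict Int Int) (c f g : Int),
      LruInv L d c →
      (acessos.foldl (stepA num_frames) (L, f, g)).2 =
        (acessos.foldl (stepB num_frames) ((d, c), f, g)).2 := by
  intro acessos
  induction acessos with
  | nil => intro L d c f g _; rfl
  | cons p t ih =>
    intro L d c f g hinv
    obtain ⟨heq, hinv'⟩ := step_sim hnf hinv p
    simp only [List.foldl_cons]
    rcases hA : stepA num_frames (L, f, g) p with ⟨L2, f2, g2⟩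
    rcases hB : stepB num_frames ((d, c), f, g) p with ⟨⟨d2, c2⟩, f3, g3⟩
    rw [hA, hB] at heq hinv'
    simp only at heq hinv'
    obtain ⟨hf, hg⟩ : f2 = f3 ∧ g2 = g3 := by
      exact ⟨congrArg Prod.fst heq, congrArg Prod.snd heq⟩
    subst hf; subst hg
    exact ih _ _ _ _ _ hinv'

-- ===== VERDICT (by name: the statement is the Claim_ definition above) =====
theorem faltas_pagina_lru_spec : Claim_equal_faltas_pagina_lru := by
  intro acessos num_frames _ hpre
  unfold Spec_faltas_pagina_lru faltas_pagina_lru faltas_pagina_lru_alt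
  rcases hpre with rfl | hnf
  · rfl
  · exact loop_sim hnf acessos [] PySem.Dict.empty 0 0 0
      ⟨by simp [PySem.Dict.contains_empty], by simp [PySem.Dict.keys_empty],
       List.Pairwise.nil, by simp, by simp [PySem.Dict.size_empty]⟩
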